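-- pv_equiv track=rewrite | github.com/NaegleLab/proteomescout-v4 | flatfile_app/protein_data.py | _protein_matches
-- ===== SOURCE A (Python) =====
-- def _normalize(value):
--     return str(value or '').strip().lower()
--
-- def _protein_matches(protein, query, peptide, species):
--     if species and _normalize(protein.get('species')) != species:
--         return None
--
--     if peptide:
--         sequence = _normalize(protein.get('sequence'))
--         if peptide not in sequence:
--             return None
--
--     if not query:
--         return (0, 0, protein.get('protein_name', ''), protein.get('protein_id', ''))
--
--     searchable_fields = [
--         protein.get('protein_id', ''),
--         protein.get('acc_gene', ''),
--         protein.get('protein_name', ''),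
--         protein.get('uniprot_id', ''),
--         protein.get('accessions', ''),
--     ]
--
--     normalized_fields = [_normalize(field) for field in searchable_fields]
--     exact_match = any(field == query for field in normalized_fields)
--     starts_match = any(field.startswith(query) for field in normalized_fields)
--     contains_match = any(query in field for field in normalized_fields)
--
--     if not contains_match:
--         return None
--
--     return (
--         0 if exact_match else 1,
--         0 if starts_match else 1,
--         protein.get('protein_name', ''),
--         protein.get('protein_id', ''),
--     )
-- ===== SOURCE B (Python) =====
-- def _normalize(value):
--     return str(value or '').strip().lower()
--
-- _KEYS = ('protein_id', 'acc_gene', 'protein_name', 'uniprot_id', 'accessions')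
--
-- def _best_rank(query, fields):
--     if not fields:
--         return 3
--     f = fields[0]
--     if f == query:
--         return 0
--     rest = _best_rank(query, fields[1:])
--     r = 1 if f.startswith(query) else (2 if query in f else 3)
--     return r if r < rest else rest
--
-- def _protein_matches(protein, query, peptide, species):
--     name = protein.get('protein_name', '')
--     pid = protein.get('protein_id', '')
--     ok = ((not species or _normalize(protein.get('species')) == species)
--           and (not peptide or peptide in _normalize(protein.get('sequence'))))
--     if not ok:
--         return None
--     if not query:
--         return (0, 0, name, pid)
--     best = _best_rank(query, [_normalize(protein.get(k, '')) for k in _KEYS])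
--     if best < 3:
--         return (0 if best == 0 else 1, 0 if best <= 1 else 1, name, pid)
--     return None
-- ===== Notes on version B (the rewrite author's own statement) =====
-- stated objective: alternative
-- what changed: Replaced the three independent any() scans over a prebuilt normalized-fields list by a recursive minimum-rank search (_best_rank: 0 exact, 1 prefix, 2 substring, 3 none, with early exit on an exact hit) and flattened the two negative guard returns into one positive ok conjunction; the result tuple is decoded from the minimum rank.
import Mathlib
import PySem

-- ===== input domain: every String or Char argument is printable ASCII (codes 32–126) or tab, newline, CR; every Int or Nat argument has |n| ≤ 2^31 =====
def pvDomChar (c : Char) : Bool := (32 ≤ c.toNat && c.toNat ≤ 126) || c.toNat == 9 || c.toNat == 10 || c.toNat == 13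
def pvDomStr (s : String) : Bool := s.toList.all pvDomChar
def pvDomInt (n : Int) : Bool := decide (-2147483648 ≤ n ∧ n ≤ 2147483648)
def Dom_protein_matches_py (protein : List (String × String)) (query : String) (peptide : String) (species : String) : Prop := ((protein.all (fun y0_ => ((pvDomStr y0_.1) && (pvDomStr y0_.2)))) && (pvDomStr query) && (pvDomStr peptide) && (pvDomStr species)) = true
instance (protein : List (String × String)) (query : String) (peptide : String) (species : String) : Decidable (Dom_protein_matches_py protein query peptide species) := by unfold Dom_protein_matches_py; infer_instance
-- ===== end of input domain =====

-- B replaces A's three independent any() scans by a recursive minimum-rank search over the five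
-- normalized fields (0 exact, 1 prefix, 2 substring, 3 none; early exit on exact) and flattens the
-- two negative guards into one positive conjunction; same cost, different decomposition.

-- ===== PORT A =====
-- _normalize(value) for a string value: str(value or '').strip().lower(); None and '' both give ''.
def pvNorm (s : String) : String := PySem.Str.lower (PySem.Str.strip s)

def protein_matches_py (protein : List (String × String)) (query : String) (peptide : String) (species : String) : Option (Int × Int × String × String) :=
  let d := PySem.Dict.mk protein
  if species ≠ "" ∧ pvNorm ((d.get? "species").getD "") ≠ species then none
  else if peptide ≠ "" ∧ PySem.Str.isIn peptide (pvNorm ((d.get? "sequence").getD "")) = false then none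
  else if query = "" then some (0, 0, d.getD "protein_name" "", d.getD "protein_id" "")
  else
    let searchable_fields := [d.getD "protein_id" "", d.getD "acc_gene" "", d.getD "protein_name" "", d.getD "uniprot_id" "", d.getD "accessions" ""]
    let normalized_fields := List.map pvNorm searchable_fields
    let exact_match := normalized_fields.any (fun f => f == query)
    let starts_match := normalized_fields.any (fun f => PySem.Str.startswith f query)
    let contains_match := normalized_fields.any (fun f => PySem.Str.isIn query f)
    if contains_match = false then none
    else some ((if exact_match then 0 else 1), (if starts_match then 0 else 1), d.getD "protein_name" "", d.getD "protein_id" "")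

-- ===== PORT B =====
-- recursive minimum match rank: 0 exact (early exit), 1 prefix, 2 substring, 3 no match
def pvBestRank (query : String) (fields : List String) : Nat :=
  match fields with
  | [] => 3
  | f :: tail =>
    if f == query then 0
    else
      let rest := pvBestRank query tail
      let r := if PySem.Str.startswith f query then 1 else if PySem.Str.isIn query f then 2 else 3
      if r < rest then r else rest

def protein_matches_py_alt (protein : List (String × String)) (query : String) (peptide : String) (species : String) : Option (Int × Int × String × String) :=
  let d := PySem.Dict.mk protein
  let name := d.getD "protein_name" ""
  let pid := d.getD "protein_id" ""
  let ok := (species == "" || pvNorm ((d.get? "species").getD "") == species)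
         && (peptide == "" || PySem.Str.isIn peptide (pvNorm ((d.get? "sequence").getD "")))
  if ok = false then none
  else if query = "" then some (0, 0, name, pid)
  else
    let best := pvBestRank query (["protein_id", "acc_gene", "protein_name", "uniprot_id", "accessions"].map (fun k => pvNorm (d.getD k "")))
    if best < 3 then some ((if best = 0 then 0 else 1), (if best ≤ 1 then 0 else 1), name, pid)
    else none

-- ===== PRECONDITION & SPEC =====
def Spec_protein_matches_py (protein : List (String × String)) (query : String) (peptide : String) (species : String) (out : Option (Int × Int × String × String)) : Prop := out = protein_matches_py_alt protein query peptide species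
instance (protein : List (String × String)) (query : String) (peptide : String) (species : String) (out : Option (Int × Int × String × String)) : Decidable (Spec_protein_matches_py protein query peptide species out) := by unfold Spec_protein_matches_py; infer_instance

-- ===== CLAIM =====
def Claim_equal_protein_matches_py : Prop := ∀ (protein : List (String × String)) (query : String) (peptide : String) (species : String), Dom_protein_matches_py protein query peptide species → Spec_protein_matches_py protein query peptide species (protein_matches_py protein query peptide species)

-- ===== LEMMAS AND PROOFS =====

-- proof-side rank of one field
def pvRank (query f : String) : Nat :=
  if f == query then 0
  else if PySem.Str.startswith f query then 1
  else if PySem.Str.isIn query f then 2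
  else 3

lemma pv_startswith_self (f : String) : PySem.Str.startswith f f = true := by
  rw [PySem.Str.startswith_eq, PySem.Chars.startswith_iff]

lemma pv_isIn_self (f : String) : PySem.Str.isIn f f = true := by
  rw [PySem.Str.isIn_eq, PySem.Chars.isIn_iff_infix]

lemma pv_startswith_isIn {q f : String} (h : PySem.Str.startswith f q = true) : PySem.Str.isIn q f = true := by
  rw [PySem.Str.isIn_eq, PySem.Chars.isIn_iff_infix]
  rw [PySem.Str.startswith_eq, PySem.Chars.startswith_iff] at h
  exact h.isInfix

lemma pvBestRank_le_iff (q : String) (l : List String) (c : Nat) :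
    pvBestRank q l ≤ c ↔ 3 ≤ c ∨ ∃ f ∈ l, pvRank q f ≤ c := by
  induction l with
  | nil => simp [pvBestRank]
  | cons f t ih =>
    simp only [pvBestRank, List.mem_cons]
    by_cases he : (f == q) = true
    · rw [if_pos he]
      refine iff_of_true (Nat.zero_le _) (Or.inr ⟨f, Or.inl rfl, ?_⟩)
      simp [pvRank, he]
    · rw [if_neg he]
      have hr : (if PySem.Str.startswith f q then 1 else if PySem.Str.isIn q f then 2 else 3) = pvRank q f := by
        simp [pvRank, he]
      rw [hr]
      constructor
      · intro h
        split_ifs at h with hlt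
        · exact Or.inr ⟨f, Or.inl rfl, h⟩
        · rcases (ih).mp h with h3 | ⟨g, hg, hgle⟩
          · exact Or.inl h3
          · exact Or.inr ⟨g, Or.inr hg, hgle⟩
      · intro h
        have hrest := ih
        rcases h with h3 | ⟨g, hg | hg, hgle⟩
        · have : pvBestRank q t ≤ c := hrest.mpr (Or.inl h3)
          split_ifs with hlt <;> omega
        · subst hg
          split_ifs with hlt
          · exact hgle
          · omega
        · have : pvBestRank q t ≤ c := hrest.mpr (Or.inr ⟨g, hg, hgle⟩)
          split_ifs with hlt <;> omega

lemma pvBestRank_le_three (q : String) (l : List String) : pvBestRank q l ≤ 3 :=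
  (pvBestRank_le_iff q l 3).mpr (Or.inl le_rfl)

lemma pvRank_eq_zero_iff (q f : String) : pvRank q f = 0 ↔ (f == q) = true := by
  unfold pvRank
  split_ifs with h1 h2 h3
  · exact iff_of_true rfl h1
  · exact iff_of_false (by decide) h1
  · exact iff_of_false (by decide) h1
  · exact iff_of_false (by decide) h1

lemma pvRank_le_one_iff (q f : String) : pvRank q f ≤ 1 ↔ PySem.Str.startswith f q = true := by
  unfold pvRank
  split_ifs with h1 h2 h3
  · refine iff_of_true (by omega) ?_
    obtain rfl : f = q := by simpa using h1
    exact pv_startswith_self _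
  · exact iff_of_true (by omega) h2
  · exact iff_of_false (by omega) h2
  · exact iff_of_false (by omega) h2

lemma pvRank_le_two_iff (q f : String) : pvRank q f ≤ 2 ↔ PySem.Str.isIn q f = true := by
  unfold pvRank
  split_ifs with h1 h2 h3
  · refine iff_of_true (by omega) ?_
    obtain rfl : f = q := by simpa using h1
    exact pv_isIn_self _
  · exact iff_of_true (by omega) (pv_startswith_isIn h2)
  · exact iff_of_true (by omega) h3
  · exact iff_of_false (by omega) h3

-- ===== VERDICT =====
theorem protein_matches_py_spec : Claim_equal_protein_matches_py := by
  intro protein query peptide species _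
  unfold Spec_protein_matches_py protein_matches_py protein_matches_py_alt
  dsimp only
  set d := PySem.Dict.mk protein with hd
  -- guards: A's two nested negative guards vs B's positive conjunction
  by_cases hok : ((species == "" || pvNorm ((d.get? "species").getD "") == species)
         && (peptide == "" || PySem.Str.isIn peptide (pvNorm ((d.get? "sequence").getD "")))) = false
  · rw [if_pos hok]
    rcases Bool.and_eq_false_iff.mp hok with h | h
    · rw [if_pos]
      simp only [Bool.or_eq_false_iff, beq_eq_false_iff_ne] at h
      exact ⟨h.1, h.2⟩
    · simp only [Bool.or_eq_false_iff, beq_eq_false_iff_ne] at h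
      by_cases hs : species ≠ "" ∧ pvNorm ((d.get? "species").getD "") ≠ species
      · rw [if_pos hs]
      · rw [if_neg hs, if_pos ⟨h.1, h.2⟩]
  · rw [if_neg hok]
    have hok' := Bool.of_not_eq_false hok
    rcases Bool.and_eq_true_iff.mp hok' with ⟨h1, h2⟩
    have hs : ¬ (species ≠ "" ∧ pvNorm ((d.get? "species").getD "") ≠ species) := by
      rcases Bool.or_eq_true_iff.mp h1 with h | h
      · exact fun hc => hc.1 (by simpa using h)
      · exact fun hc => hc.2 (by simpa using h)
    have hp : ¬ (peptide ≠ "" ∧ PySem.Str.isIn peptide (pvNorm ((d.get? "sequence").getD "")) = false) := by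
      rcases Bool.or_eq_true_iff.mp h2 with h | h
      · exact fun hc => hc.1 (by simpa using h)
      · exact fun hc => by rw [hc.2] at h; cases h
    rw [if_neg hs, if_neg hp]
    by_cases hq : query = ""
    · rw [if_pos hq, if_pos hq]
    rw [if_neg hq, if_neg hq]
    set M := pvBestRank query (["protein_id", "acc_gene", "protein_name", "uniprot_id", "accessions"].map (fun k => pvNorm (d.getD k ""))) with hM
    have hiff : ∀ c : Nat, M ≤ c ↔ ∃ k ∈ (["protein_id", "acc_gene", "protein_name", "uniprot_id", "accessions"] : List String), pvRank query (pvNorm (d.getD k "")) ≤ c := by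
      intro c
      by_cases hc3 : 3 ≤ c
      · refine iff_of_true (le_trans (pvBestRank_le_three _ _) hc3) ⟨"protein_id", by simp, ?_⟩
        exact le_trans (by unfold pvRank; split_ifs <;> omega) hc3
      · rw [hM, pvBestRank_le_iff]
        simp only [List.mem_map]
        constructor
        · rintro (h | ⟨f, ⟨k, hk, rfl⟩, hle⟩)
          · omega
          · exact ⟨k, hk, hle⟩
        · rintro ⟨k, hk, hle⟩
          exact Or.inr ⟨pvNorm (d.getD k ""), ⟨k, hk, rfl⟩, hle⟩
    have hA : ∀ p : String → Bool, (((List.map pvNorm [d.getD "protein_id" "", d.getD "acc_gene" "", d.getD "protein_name" "", d.getD "uniprot_id" "", d.getD "accessions" ""]).any (fun f => p f)) = true) ↔ ∃ k ∈ (["protein_id", "acc_gene", "protein_name", "uniprot_id", "accessions"] : List String), p (pvNorm (d.getD k "")) = true := by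
      intro p; simp
    have hEx : (((List.map pvNorm [d.getD "protein_id" "", d.getD "acc_gene" "", d.getD "protein_name" "", d.getD "uniprot_id" "", d.getD "accessions" ""]).any (fun f => f == query)) = true) ↔ M = 0 := by
      rw [hA, ← Nat.le_zero, hiff 0]
      simp [pvRank_eq_zero_iff]
    have hSt : (((List.map pvNorm [d.getD "protein_id" "", d.getD "acc_gene" "", d.getD "protein_name" "", d.getD "uniprot_id" "", d.getD "accessions" ""]).any (fun f => PySem.Str.startswith f query)) = true) ↔ M ≤ 1 := by
      rw [hA, hiff 1]
      simp [pvRank_le_one_iff]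
    have hCo : (((List.map pvNorm [d.getD "protein_id" "", d.getD "acc_gene" "", d.getD "protein_name" "", d.getD "uniprot_id" "", d.getD "accessions" ""]).any (fun f => PySem.Str.isIn query f)) = true) ↔ M ≤ 2 := by
      rw [hA, hiff 2]
      simp [pvRank_le_two_iff]
    have hle3 : M ≤ 3 := pvBestRank_le_three _ _
    by_cases hc : ((List.map pvNorm [d.getD "protein_id" "", d.getD "acc_gene" "", d.getD "protein_name" "", d.getD "uniprot_id" "", d.getD "accessions" ""]).any (fun f => PySem.Str.isIn query f)) = true
    · have hM2 : M ≤ 2 := hCo.mp hc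
      rw [if_neg (by simp only [hc]; decide), if_pos (by omega : M < 3)]
      by_cases he : ((List.map pvNorm [d.getD "protein_id" "", d.getD "acc_gene" "", d.getD "protein_name" "", d.getD "uniprot_id" "", d.getD "accessions" ""]).any (fun f => f == query)) = true
      · rw [if_pos he, if_pos (hEx.mp he)]
        by_cases hst : ((List.map pvNorm [d.getD "protein_id" "", d.getD "acc_gene" "", d.getD "protein_name" "", d.getD "uniprot_id" "", d.getD "accessions" ""]).any (fun f => PySem.Str.startswith f query)) = true
        · rw [if_pos hst, if_pos (hSt.mp hst)]
        · rw [if_neg hst, if_neg (fun h => hst (hSt.mpr h))]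
      · rw [if_neg he, if_neg (fun h => he (hEx.mpr h))]
        by_cases hst : ((List.map pvNorm [d.getD "protein_id" "", d.getD "acc_gene" "", d.getD "protein_name" "", d.getD "uniprot_id" "", d.getD "accessions" ""]).any (fun f => PySem.Str.startswith f query)) = true
        · rw [if_pos hst, if_pos (hSt.mp hst)]
        · rw [if_neg hst, if_neg (fun h => hst (hSt.mpr h))]
    · have h2 : ¬ M ≤ 2 := fun h => hc (hCo.mpr h)
      rw [if_pos (Bool.eq_false_iff.mpr hc), if_neg (by omega : ¬ M < 3)]
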